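-- pv_equiv track=rewrite | github.com/CTLaw90/DailyProgrammer | 374 additive/easy.py | persistance
-- ===== SOURCE A (Python) =====
-- def persistance(n, i):
-- 	if n<10:
-- 		return(i)
-- 	a = 0
-- 	while n > 0:
-- 		a += n%10
-- 		n = int(n//10)
-- 	return(persistance(a,i+1))
-- ===== SOURCE B (Python) =====
-- def _digits(m):
-- 	if m <= 0:
-- 		return []
-- 	m2, r = divmod(m, 10)
-- 	return [r] + _digits(m2)
--
-- def persistance(n, i):
-- 	count = i
-- 	while n >= 10:
-- 		n = sum(_digits(n))
-- 		count += 1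
-- 	return count
-- ===== Notes on version B (the rewrite author's own statement) =====
-- stated objective: alternative
-- what changed: Replaced A's outer tail recursion carrying the counter and its inner accumulator while-loop by an explicit counting while loop over sum() of an explicit digit list built by a recursive divmod helper.
import Mathlib
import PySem

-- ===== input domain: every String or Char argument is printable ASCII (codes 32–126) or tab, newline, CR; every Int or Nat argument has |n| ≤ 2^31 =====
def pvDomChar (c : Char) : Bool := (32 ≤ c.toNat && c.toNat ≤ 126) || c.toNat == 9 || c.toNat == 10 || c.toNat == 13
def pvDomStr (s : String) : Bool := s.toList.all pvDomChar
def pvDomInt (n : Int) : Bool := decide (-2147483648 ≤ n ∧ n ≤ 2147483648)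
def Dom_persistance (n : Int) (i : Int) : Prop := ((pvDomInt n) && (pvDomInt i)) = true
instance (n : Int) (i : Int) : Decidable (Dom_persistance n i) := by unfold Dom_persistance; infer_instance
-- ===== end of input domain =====

-- B replaces A's outer tail recursion (counter threaded through calls) and inner
-- accumulator while-loop by a counting while loop over sum() of an explicit digit
-- list built by a recursive divmod helper (objective: alternative decomposition).
-- Fuel arguments are totality guards only; n.toNat + 1 always suffices.

-- ===== PORT A =====

-- A's inner `while n > 0: a += n%10; n = int(n//10)` loop.
def pvSumLoopA (fuel : Nat) (n a : Int) : Int :=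
  match fuel with
  | 0 => a
  | f + 1 =>
    if n > 0 then pvSumLoopA f (PySem.Int.floordiv n 10) (a + PySem.Int.mod n 10)
    else a

-- A's recursion: `if n < 10: return i`, else recurse on the digit sum with i+1.
def pvPersistA (fuel : Nat) (n i : Int) : Int :=
  match fuel with
  | 0 => i
  | f + 1 =>
    if n < 10 then i
    else pvPersistA f (pvSumLoopA (n.toNat + 1) n 0) (i + 1)

def persistance (n : Int) (i : Int) : Int := pvPersistA (n.toNat + 1) n i

-- ===== PORT B =====

-- B's helper _digits: [] if m <= 0, else [r] + _digits(m2) with m2, r = divmod(m, 10).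
def pvDigitsB (fuel : Nat) (m : Int) : List Int :=
  match fuel with
  | 0 => []
  | f + 1 =>
    if m ≤ 0 then []
    else
      match PySem.Int.divmod? m 10 with
      | some (m2, r) => [r] ++ pvDigitsB f m2
      | none => []

-- B's `while n >= 10: n = sum(_digits(n)); count += 1` loop.
def pvCountB (fuel : Nat) (n count : Int) : Int :=
  match fuel with
  | 0 => count
  | f + 1 =>
    if 10 ≤ n then pvCountB f (pvDigitsB (n.toNat + 1) n).sum (count + 1)
    else count

def persistance_alt (n : Int) (i : Int) : Int := pvCountB (n.toNat + 1) n i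

-- ===== PRECONDITION & SPEC =====
def Spec_persistance (n : Int) (i : Int) (out : Int) : Prop := out = persistance_alt n i
instance (n : Int) (i : Int) (out : Int) : Decidable (Spec_persistance n i out) := by unfold Spec_persistance; infer_instance

-- ===== CLAIM (what is proved, stated in full; the proofs are below) =====
def Claim_equal_persistance : Prop := ∀ (n : Int) (i : Int), Dom_persistance n i → Spec_persistance n i (persistance n i)

-- ===== LEMMAS AND PROOFS =====

-- divmod? with divisor 10 is the floor pair
theorem pvDivmod_ten (m : Int) :
    PySem.Int.divmod? m 10 = some (m / 10, m % 10) := by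
  have h1 : PySem.Int.floordiv m 10 = m / 10 := PySem.Int.floordiv_eq_ediv_of_pos (by norm_num)
  have h2 : PySem.Int.mod m 10 = m % 10 := PySem.Int.mod_eq_emod_of_pos (by norm_num)
  simp [PySem.Int.divmod?, PySem.Int.floordiv, PySem.Int.mod] at *
  omega

-- B's digit sum is bounded: 0 ≤ sum ≤ m for 0 ≤ m (with sufficient fuel)
theorem pvDigitsB_sum_le : ∀ (g : Nat) (m : Int), 0 ≤ m → m.toNat < g →
    0 ≤ (pvDigitsB g m).sum ∧ (pvDigitsB g m).sum ≤ m := by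
  intro g
  induction g with
  | zero => intro m _ h; omega
  | succ f ih =>
    intro m hm hg
    rw [pvDigitsB]
    by_cases hc : m ≤ 0
    · rw [if_pos hc]; simp; omega
    · rw [if_neg hc, pvDivmod_ten]
      have h5 : 10 * (m / 10) + m % 10 = m := by omega
      have ih' := ih (m / 10) (by omega) (by omega)
      simp only [List.cons_append, List.nil_append, List.sum_cons]
      omega

-- and strictly shrinking for 10 ≤ m
theorem pvDigitsB_sum_lt (g : Nat) (m : Int) (hm : 10 ≤ m) (hg : m.toNat < g) :
    0 ≤ (pvDigitsB g m).sum ∧ (pvDigitsB g m).sum < m := by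
  match g with
  | f + 1 =>
    rw [pvDigitsB, if_neg (by omega), pvDivmod_ten]
    have h5 : 10 * (m / 10) + m % 10 = m := by omega
    have hb := pvDigitsB_sum_le f (m / 10) (by omega) (by omega)
    simp only [List.cons_append, List.nil_append, List.sum_cons]
    omega

-- A's accumulator loop computes a + the sum of B's digit list (any sufficient fuels)
theorem pvSum_eq : ∀ (f : Nat) (g : Nat) (m a : Int), 0 ≤ m → m.toNat < f → m.toNat < g →
    pvSumLoopA f m a = a + (pvDigitsB g m).sum := by
  intro f
  induction f with
  | zero => intro g m a _ hf _; omega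
  | succ f ih =>
    intro g m a hm hf hg
    rw [pvSumLoopA]
    match g, hg with
    | g' + 1, hg =>
      rw [pvDigitsB]
      by_cases h : m > 0
      · rw [if_pos h, if_neg (by omega), pvDivmod_ten]
        have hd : PySem.Int.floordiv m 10 = m / 10 := PySem.Int.floordiv_eq_ediv_of_pos (by norm_num)
        have hmo : PySem.Int.mod m 10 = m % 10 := PySem.Int.mod_eq_emod_of_pos (by norm_num)
        have h5 : 10 * (m / 10) + m % 10 = m := by omega
        rw [hd, hmo, ih g' (m / 10) (a + m % 10) (by omega) (by omega) (by omega)]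
        simp only [List.cons_append, List.nil_append, List.sum_cons]
        ring
      · rw [if_neg h, if_pos (by omega)]
        simp

-- A's recursion equals B's counting loop (any sufficient fuels)
theorem pvPersist_eq : ∀ (f : Nat) (g : Nat) (n i : Int), n.toNat < f → n.toNat < g →
    pvPersistA f n i = pvCountB g n i := by
  intro f
  induction f with
  | zero => intro g n i hf _; omega
  | succ f ih =>
    intro g n i hf hg
    rw [pvPersistA]
    match g, hg with
    | g' + 1, hg =>
      rw [pvCountB]
      by_cases h : n < 10
      · rw [if_pos h, if_neg (by omega)]
      · rw [if_neg h, if_pos (by omega)]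
        have hs : pvSumLoopA (n.toNat + 1) n 0 = (pvDigitsB (n.toNat + 1) n).sum := by
          have := pvSum_eq (n.toNat + 1) (n.toNat + 1) n 0 (by omega) (by omega) (by omega)
          omega
        have hb := pvDigitsB_sum_lt (n.toNat + 1) n (by omega) (by omega)
        rw [hs]
        exact ih g' (pvDigitsB (n.toNat + 1) n).sum (i + 1) (by omega) (by omega)

-- ===== VERDICT (by name: the statement is the Claim_ definition above) =====
theorem persistance_spec : Claim_equal_persistance := by
  intro n i _
  unfold Spec_persistance persistance_alt persistance
  exact pvPersist_eq (n.toNat + 1) (n.toNat + 1) n i (by omega) (by omega)
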